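-- pv_equiv track=rewrite | github.com/MrBrantCode/unitest_baseline | mut_generate/mist_train_taco/taco_225/solution.py | minimize_angry_comments
-- ===== SOURCE A (Python) =====
-- def minimize_angry_comments(s, x, y):
--     c0 = 0
--     c1 = 0
--     r = 0
--     for i in s:
--         if i == '0':
--             c0 += 1
--         else:
--             r += c0 * x
--             c1 += 1
--     z0 = 0
--     for i in range(len(s) - 1, -1, -1):
--         if s[i] == '0':
--             z0 += 1
--         else:
--             r += z0 * y
--     ans = r
--     l0 = 0
--     l1 = 0
--     for i in s:
--         if i == '?':
--             r -= l0 * x + c0 * y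
--             c1 -= 1
--             r += l1 * y + c1 * x
--             l0 += 1
--         elif i == '0':
--             l0 += 1
--             c0 -= 1
--         else:
--             l1 += 1
--             c1 -= 1
--         ans = min(ans, r)
--     return ans
-- ===== SOURCE B (Python) =====
-- def _cost(s, x, y, k):
--     # total weighted pair cost of the assignment where the first k '?' become '0'
--     # and the rest become '1' (non-'0' characters count as '1', as in A)
--     z = 0
--     o = 0
--     c = 0
--     seen = 0
--     for ch in s:
--         if ch == '?':
--             seen += 1
--             if seen <= k:
--                 c += o * y
--                 z += 1
--             else:
--                 c += z * x
--                 o += 1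
--         elif ch == '0':
--             c += o * y
--             z += 1
--         else:
--             c += z * x
--             o += 1
--     return c
--
--
-- def minimize_angry_comments(s, x, y):
--     q = sum(1 for ch in s if ch == '?')
--     best = _cost(s, x, y, 0)
--     for k in range(1, q + 1):
--         best = min(best, _cost(s, x, y, k))
--     return best
-- ===== Notes on version B (the rewrite author's own statement) =====
-- stated objective: alternative
-- what changed: Replaces A's single incremental sweep (maintaining running prefix/suffix counters and updating the cost in place at each '?') by an independent recomputation: for each threshold k from 0 to the number of '?', the cost of the assignment 'first k ? become 0, the rest 1' is computed from scratch by one prefix-count scan, and the minimum is returned.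
import Mathlib
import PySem

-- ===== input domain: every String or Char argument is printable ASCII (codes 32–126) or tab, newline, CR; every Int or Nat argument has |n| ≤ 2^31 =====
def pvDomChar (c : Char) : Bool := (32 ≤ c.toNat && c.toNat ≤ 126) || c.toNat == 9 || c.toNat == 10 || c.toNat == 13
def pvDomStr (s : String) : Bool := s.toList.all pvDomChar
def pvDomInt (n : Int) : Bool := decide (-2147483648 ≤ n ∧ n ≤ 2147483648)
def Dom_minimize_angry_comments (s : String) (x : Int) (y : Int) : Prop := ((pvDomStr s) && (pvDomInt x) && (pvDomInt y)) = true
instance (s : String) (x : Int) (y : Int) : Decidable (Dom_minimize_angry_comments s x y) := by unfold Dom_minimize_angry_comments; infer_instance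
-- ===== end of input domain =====

-- B replaces A's single incremental sweep by an independent per-threshold recomputation
-- (for each k, cost of "first k '?' → '0', rest → '1'" by one prefix-count scan); same values, no speed claim.

-- ===== PORT A =====
-- step of A's first loop, state (c0, c1, r)
def pvA1 (x : Int) (st : Int × Int × Int) (i : Char) : Int × Int × Int :=
  if i = '0' then (st.1 + 1, st.2.1, st.2.2) else (st.1, st.2.1 + 1, st.2.2 + st.1 * x)

-- step of A's second loop, state (z0, r)
def pvA2 (y : Int) (st : Int × Int) (i : Char) : Int × Int :=
  if i = '0' then (st.1 + 1, st.2) else (st.1, st.2 + st.1 * y)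

-- step of A's third loop, state (r, ans, l0, l1, c0, c1)
def pvA3 (x y : Int) (st : Int × Int × Int × Int × Int × Int) (i : Char) :
    Int × Int × Int × Int × Int × Int :=
  let (r, ans, l0, l1, c0, c1) := st
  if i = '?' then
    let r := r - (l0 * x + c0 * y)
    let c1 := c1 - 1
    let r := r + (l1 * y + c1 * x)
    let l0 := l0 + 1
    (r, min ans r, l0, l1, c0, c1)
  else if i = '0' then (r, min ans r, l0 + 1, l1, c0 - 1, c1)
  else (r, min ans r, l0, l1 + 1, c0, c1 - 1)

def minimize_angry_comments (s : String) (x : Int) (y : Int) : Int :=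
  let l := s.toList
  let st1 := l.foldl (pvA1 x) (0, 0, 0)
  -- "for i in range(len(s)-1, -1, -1): … s[i] …": index countdown; every index is in range
  let st2 := (PySem.List.pyRange ((l.length : Int) - 1) (-1) (-1)).foldl
      (fun st i => pvA2 y st (PySem.List.pyGetD l i '?')) ((0 : Int), st1.2.2)
  (l.foldl (pvA3 x y) (st2.2, st2.2, 0, 0, st1.1, st1.2.1)).2.1

-- ===== PORT B =====
-- step of B's scan in _cost, state (z, o, c, seen)
def pvB (x y k : Int) (st : Int × Int × Int × Int) (ch : Char) : Int × Int × Int × Int :=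
  let (z, o, c, seen) := st
  if ch = '?' then
    if seen + 1 ≤ k then (z + 1, o, c + o * y, seen + 1) else (z, o + 1, c + z * x, seen + 1)
  else if ch = '0' then (z + 1, o, c + o * y, seen)
  else (z, o + 1, c + z * x, seen)

-- _cost(s, x, y, k)
def pvCost (l : List Char) (x y k : Int) : Int :=
  (l.foldl (pvB x y k) (0, 0, 0, 0)).2.2.1

def minimize_angry_comments_alt (s : String) (x : Int) (y : Int) : Int :=
  let l := s.toList
  let q := l.foldl (fun n ch => n + if ch = '?' then (1 : Int) else 0) (0 : Int)
  (PySem.List.pyRange 1 (q + 1) 1).foldl (fun best k => min best (pvCost l x y k)) (pvCost l x y 0)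

-- ===== PRECONDITION & SPEC =====
def Spec_minimize_angry_comments (s : String) (x : Int) (y : Int) (out : Int) : Prop := out = minimize_angry_comments_alt s x y
instance (s : String) (x : Int) (y : Int) (out : Int) : Decidable (Spec_minimize_angry_comments s x y out) := by unfold Spec_minimize_angry_comments; infer_instance

-- ===== CLAIM (what is proved, stated in full; the proofs are below) =====
def Claim_equal_minimize_angry_comments : Prop := ∀ (s : String) (x : Int) (y : Int), Dom_minimize_angry_comments s x y → Spec_minimize_angry_comments s x y (minimize_angry_comments s x y)

-- ===== LEMMAS AND PROOFS =====

-- number of '0' characters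
def pvZ : List Char → Int
  | [] => 0
  | c :: t => (if c = '0' then 1 else 0) + pvZ t

-- number of non-'0' characters
def pvN : List Char → Int
  | [] => 0
  | c :: t => (if c = '0' then 0 else 1) + pvN t

-- number of '?' characters
def pvQ : List Char → Nat
  | [] => 0
  | c :: t => (if c = '?' then 1 else 0) + pvQ t

-- the bit list ("is zero") of the assignment where the first k '?' become '0'
def pvBits : Nat → List Char → List Bool
  | _, [] => []
  | k, c :: t =>
    if c = '?' then
      match k with
      | 0 => false :: pvBits 0 t
      | k + 1 => true :: pvBits k t
    else (c = '0') :: pvBits k t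

def pvzB : List Bool → Int
  | [] => 0
  | b :: t => (if b then 1 else 0) + pvzB t

def pvnB : List Bool → Int
  | [] => 0
  | b :: t => (if b then 0 else 1) + pvnB t

-- pair cost of a bit list: x per (zero, later nonzero), y per (nonzero, later zero)
def pvP (x y : Int) : List Bool → Int
  | [] => 0
  | b :: t => (if b then x * pvnB t else y * pvzB t) + pvP x y t

-- full cost of threshold j on suffix q, given prefix summary (l0 zeros, l1 ones, internal cost C)
def pvR (x y l0 l1 C : Int) (q : List Char) (j : Nat) : Int :=
  C + x * l0 * pvnB (pvBits j q) + y * l1 * pvzB (pvBits j q) + pvP x y (pvBits j q)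

-- min over thresholds 0..pvQ q of pvR
def pvF (x y l0 l1 C : Int) (q : List Char) : Int :=
  (List.range (pvQ q)).foldl (fun m j => min m (pvR x y l0 l1 C q (j + 1))) (pvR x y l0 l1 C q 0)

-- minimum of A's running r over the steps of the third loop (none for the empty suffix)
def pvBest (x y : Int) : Int → Int → Int → List Char → Option Int
  | _, _, _, [] => none
  | l0, l1, C, c :: t =>
    let p : Int × Int × Int :=
      if c = '?' ∨ c = '0' then (l0 + 1, l1, C + y * l1) else (l0, l1 + 1, C + x * l0)
    let v := pvR x y p.1 p.2.1 p.2.2 t 0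
    some (match pvBest x y p.1 p.2.1 p.2.2 t with
          | none => v
          | some m => min v m)

-- x-part / y-part of the all-ones assignment, as accumulated by A's first two loops
def pvPX (x : Int) : List Char → Int
  | [] => 0
  | c :: t => (if c = '0' then x * pvN t else 0) + pvPX x t

def pvPY (y : Int) : List Char → Int
  | [] => 0
  | c :: t => (if c = '0' then 0 else y * pvZ t) + pvPY y t

lemma pvzB_bits0 (q : List Char) : pvzB (pvBits 0 q) = pvZ q := by
  induction q with
  | nil => simp [pvBits, pvzB, pvZ]
  | cons c t ih =>
    by_cases h : c = '?'
    · simp [pvBits, pvzB, pvZ, h, ih]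
    · simp [pvBits, pvzB, pvZ, h, ih]

lemma pvnB_bits0 (q : List Char) : pvnB (pvBits 0 q) = pvN q := by
  induction q with
  | nil => simp [pvBits, pvnB, pvN]
  | cons c t ih =>
    by_cases h : c = '?'
    · have : c ≠ '0' := by simp [h]
      simp [pvBits, pvnB, pvN, h, this, ih]
    · simp [pvBits, pvnB, pvN, h, ih]

lemma pvL1 (x : Int) : ∀ (q : List Char) (c0 c1 r : Int),
    q.foldl (pvA1 x) (c0, c1, r) = (c0 + pvZ q, c1 + pvN q, r + x * c0 * pvN q + pvPX x q) := by
  intro q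
  induction q with
  | nil => intro c0 c1 r; simp [pvZ, pvN, pvPX]
  | cons c t ih =>
    intro c0 c1 r
    by_cases h : c = '0' <;>
      simp only [List.foldl_cons, pvA1, h, if_true, if_false, ih, pvZ, pvN, pvPX] <;>
      refine Prod.ext (by ring) (Prod.ext (by ring) (by ring))

lemma pvL2 (y : Int) : ∀ (q : List Char) (z0 r : Int),
    q.reverse.foldl (pvA2 y) (z0, r) = (z0 + pvZ q, r + y * z0 * pvN q + pvPY y q) := by
  intro q
  induction q with
  | nil => intro z0 r; simp [pvZ, pvN, pvPY]
  | cons c t ih =>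
    intro z0 r
    rw [List.reverse_cons, List.foldl_append, ih]
    by_cases h : c = '0' <;>
      simp only [List.foldl_cons, List.foldl_nil, pvA2, h, if_true, if_false, pvZ, pvN, pvPY] <;>
      refine Prod.ext (by ring) (by ring)


lemma pvL2' (y : Int) (l : List Char) (init : Int × Int) :
    (PySem.List.pyRange ((l.length : Int) - 1) (-1) (-1)).foldl
        (fun st i => pvA2 y st (PySem.List.pyGetD l i '?')) init
      = l.reverse.foldl (pvA2 y) init := by
  have h1 : PySem.List.pyRange ((l.length : Int) - 1) (-1) (-1)
      = (PySem.List.pyRange 0 (l.length : Int) 1).reverse := by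
    rw [PySem.List.pyRange_neg_one_eq_reverse]
    norm_num
  rw [h1, ← List.foldl_map, List.map_reverse, PySem.List.map_pyGetD_pyRange_zero']

lemma pvP0 (x y : Int) (q : List Char) : pvP x y (pvBits 0 q) = pvPX x q + pvPY y q := by
  induction q with
  | nil => simp [pvBits, pvP, pvPX, pvPY]
  | cons c t ih =>
    by_cases h : c = '?'
    · subst h
      simp [pvBits, pvP, pvPX, pvPY, ih, pvzB_bits0]
      ring
    · by_cases h0 : c = '0'
      · subst h0
        simp [pvBits, pvP, pvPX, pvPY, ih, pvzB_bits0, pvnB_bits0]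
        ring
      · simp [pvBits, pvP, pvPX, pvPY, h, h0, ih, pvzB_bits0, pvnB_bits0]
        ring

lemma pvR00 (x y : Int) (q : List Char) (j : Nat) : pvR x y 0 0 0 q j = pvP x y (pvBits j q) := by
  simp [pvR]

lemma pvRshift0 (x y l0 l1 C : Int) (t : List Char) (j : Nat) :
    pvR x y l0 l1 C ('0' :: t) j = pvR x y (l0 + 1) l1 (C + y * l1) t j := by
  have hb : pvBits j ('0' :: t) = true :: pvBits j t := by simp [pvBits]
  simp only [pvR, hb, pvP, pvzB, pvnB, if_true]
  ring

lemma pvRshift1 (x y l0 l1 C : Int) (c : Char) (t : List Char) (j : Nat)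
    (h : c ≠ '?') (h0 : c ≠ '0') :
    pvR x y l0 l1 C (c :: t) j = pvR x y l0 (l1 + 1) (C + x * l0) t j := by
  have hb : pvBits j (c :: t) = false :: pvBits j t := by simp [pvBits, h, h0]
  simp only [pvR, hb, pvP, pvzB, pvnB, if_false, Bool.false_eq_true]
  ring

lemma pvRshiftQ (x y l0 l1 C : Int) (t : List Char) (j : Nat) :
    pvR x y l0 l1 C ('?' :: t) (j + 1) = pvR x y (l0 + 1) l1 (C + y * l1) t j := by
  have hb : pvBits (j + 1) ('?' :: t) = true :: pvBits j t := by simp [pvBits]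
  simp only [pvR, hb, pvP, pvzB, pvnB, if_true]
  ring

lemma pvRQ0 (x y l0 l1 C : Int) (t : List Char) :
    pvR x y l0 l1 C ('?' :: t) 0
      = C + x * l0 * (1 + pvN t) + y * l1 * pvZ t + (y * pvZ t + pvP x y (pvBits 0 t)) := by
  have hb : pvBits 0 ('?' :: t) = false :: pvBits 0 t := by simp [pvBits]
  simp only [pvR, hb, pvP, pvzB, pvnB, if_false, Bool.false_eq_true, pvzB_bits0, pvnB_bits0]
  ring

lemma pvMinFold (g : Nat → Int) : ∀ (L : List Nat) (a b : Int),
    L.foldl (fun m j => min m (g j)) (min a b) = min a (L.foldl (fun m j => min m (g j)) b) := by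
  intro L
  induction L with
  | nil => intro a b; simp
  | cons j t ih =>
    intro a b
    simp only [List.foldl_cons, min_assoc, ih]

lemma pvF_ne (x y l0 l1 C : Int) (c : Char) (t : List Char) (h : c ≠ '?') :
    pvF x y l0 l1 C (c :: t)
      = if c = '0' then pvF x y (l0 + 1) l1 (C + y * l1) t
        else pvF x y l0 (l1 + 1) (C + x * l0) t := by
  have hq : pvQ (c :: t) = pvQ t := by simp [pvQ, h]
  by_cases h0 : c = '0'
  · subst h0
    simp only [if_true]
    unfold pvF
    rw [hq]
    have hf : (fun (m : Int) (j : Nat) => min m (pvR x y l0 l1 C ('0' :: t) (j + 1)))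
        = fun m j => min m (pvR x y (l0 + 1) l1 (C + y * l1) t (j + 1)) := by
      funext m j; rw [pvRshift0]
    rw [hf, pvRshift0]
  · simp only [h0, if_false]
    unfold pvF
    rw [hq]
    have hf : (fun (m : Int) (j : Nat) => min m (pvR x y l0 l1 C (c :: t) (j + 1)))
        = fun m j => min m (pvR x y l0 (l1 + 1) (C + x * l0) t (j + 1)) := by
      funext m j; rw [pvRshift1 x y l0 l1 C c t _ h h0]
    rw [hf, pvRshift1 x y l0 l1 C c t _ h h0]

lemma pvF_q (x y l0 l1 C : Int) (t : List Char) :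
    pvF x y l0 l1 C ('?' :: t)
      = min (pvR x y l0 l1 C ('?' :: t) 0) (pvF x y (l0 + 1) l1 (C + y * l1) t) := by
  have hq : pvQ ('?' :: t) = pvQ t + 1 := by simp [pvQ]; omega
  unfold pvF
  rw [hq, List.range_succ_eq_map, List.foldl_cons, List.foldl_map]
  have hf : (fun (m : Int) (j : Nat) => min m (pvR x y l0 l1 C ('?' :: t) (j.succ + 1)))
      = fun m j => min m (pvR x y (l0 + 1) l1 (C + y * l1) t (j + 1)) := by
    funext m j
    have : j.succ + 1 = (j + 1) + 1 := rfl
    rw [this, pvRshiftQ]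
  rw [hf, pvRshiftQ x y l0 l1 C t 0]
  exact pvMinFold _ _ _ _

lemma pvScan (x y : Int) : ∀ (q : List Char) (z o c seen k : Int), 0 ≤ seen →
    (q.foldl (pvB x y k) (z, o, c, seen)).2.2.1
      = c + x * z * pvnB (pvBits (k - seen).toNat q)
          + y * o * pvzB (pvBits (k - seen).toNat q)
          + pvP x y (pvBits (k - seen).toNat q) := by
  intro q
  induction q with
  | nil => intro z o c seen k _; simp [pvBits, pvP, pvzB, pvnB]
  | cons ch t ih =>
    intro z o c seen k hs
    by_cases hq : ch = '?'
    · subst hq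
      by_cases hle : seen + 1 ≤ k
      · have hm : (k - seen).toNat = (k - (seen + 1)).toNat + 1 := by omega
        have hb : pvBits (k - seen).toNat ('?' :: t)
            = true :: pvBits (k - (seen + 1)).toNat t := by
          rw [hm]; simp [pvBits]
        rw [List.foldl_cons,
            show pvB x y k (z, o, c, seen) '?' = (z + 1, o, c + o * y, seen + 1) from by
              simp [pvB, hle],
            ih (z + 1) o (c + o * y) (seen + 1) k (by omega), hb]
        simp only [pvP, pvzB, pvnB, if_true]
        ring
      · have hm : (k - seen).toNat = 0 := by omega
        have hm' : (k - (seen + 1)).toNat = 0 := by omega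
        have hb : pvBits (k - seen).toNat ('?' :: t)
            = false :: pvBits (k - (seen + 1)).toNat t := by
          rw [hm, hm']; simp [pvBits]
        rw [List.foldl_cons,
            show pvB x y k (z, o, c, seen) '?' = (z, o + 1, c + z * x, seen + 1) from by
              simp [pvB, hle],
            ih z (o + 1) (c + z * x) (seen + 1) k (by omega), hb]
        simp only [pvP, pvzB, pvnB, if_false, Bool.false_eq_true]
        ring
    · by_cases h0 : ch = '0'
      · subst h0
        rw [List.foldl_cons,
            show pvB x y k (z, o, c, seen) '0' = (z + 1, o, c + o * y, seen) from by simp [pvB],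
            ih (z + 1) o (c + o * y) seen k hs]
        simp [pvBits, pvP, pvzB, pvnB]
        ring
      · rw [List.foldl_cons,
            show pvB x y k (z, o, c, seen) ch = (z, o + 1, c + z * x, seen) from by
              simp [pvB, hq, h0],
            ih z (o + 1) (c + z * x) seen k hs]
        simp [pvBits, pvP, pvzB, pvnB, hq, h0]
        ring

lemma pvCost_eq (x y : Int) (l : List Char) (k : Int) :
    pvCost l x y k = pvR x y 0 0 0 l k.toNat := by
  unfold pvCost
  rw [pvScan x y l 0 0 0 0 k le_rfl]
  simp [pvR]

lemma pvCountQ : ∀ (q : List Char) (n : Int),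
    q.foldl (fun n ch => n + if ch = '?' then (1 : Int) else 0) n = n + (pvQ q : Int) := by
  intro q
  induction q with
  | nil => intro n; simp [pvQ]
  | cons c t ih =>
    intro n
    by_cases h : c = '?' <;> simp [pvQ, h, ih] <;> push_cast <;> ring

lemma pvL3 (x y : Int) : ∀ (q : List Char) (l0 l1 C ans r : Int),
    r = pvR x y l0 l1 C q 0 →
    (q.foldl (pvA3 x y) (r, ans, l0, l1, pvZ q, pvN q)).2.1
      = match pvBest x y l0 l1 C q with
        | none => ans
        | some m => min ans m := by
  intro q
  induction q with
  | nil => intro l0 l1 C ans r _; simp [pvBest]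
  | cons c t ih =>
    intro l0 l1 C ans r hr
    by_cases hq : c = '?'
    · subst hq
      have hZ : pvZ ('?' :: t) = pvZ t := by simp [pvZ]
      have hN : pvN ('?' :: t) = 1 + pvN t := by simp [pvN]
      have hr' : r - (l0 * x + pvZ t * y) + (l1 * y + pvN t * x)
          = pvR x y (l0 + 1) l1 (C + y * l1) t 0 := by
        rw [hr, pvRQ0]
        simp only [pvR, pvzB_bits0, pvnB_bits0]
        ring
      have hstep : pvA3 x y (r, ans, l0, l1, pvZ ('?' :: t), pvN ('?' :: t)) '?'
          = (r - (l0 * x + pvZ t * y) + (l1 * y + pvN t * x),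
             min ans (r - (l0 * x + pvZ t * y) + (l1 * y + pvN t * x)),
             l0 + 1, l1, pvZ t, pvN t) := by
        simp [pvA3, hZ, hN]
      rw [List.foldl_cons, hstep, ih (l0 + 1) l1 (C + y * l1) _ _ hr']
      rcases hbt : pvBest x y (l0 + 1) l1 (C + y * l1) t with _ | m
      · simp [pvBest, hbt, hr']
      · simp [pvBest, hbt, hr', min_assoc]
    · by_cases h0 : c = '0'
      · subst h0
        have hZ : pvZ ('0' :: t) = 1 + pvZ t := by simp [pvZ]
        have hN : pvN ('0' :: t) = pvN t := by simp [pvN]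
        have hr' : r = pvR x y (l0 + 1) l1 (C + y * l1) t 0 := by
          rw [hr, pvRshift0]
        have hstep : pvA3 x y (r, ans, l0, l1, pvZ ('0' :: t), pvN ('0' :: t)) '0'
            = (r, min ans r, l0 + 1, l1, pvZ t, pvN t) := by
          simp [pvA3, hZ, hN]
        rw [List.foldl_cons, hstep, ih (l0 + 1) l1 (C + y * l1) _ _ hr']
        rcases hbt : pvBest x y (l0 + 1) l1 (C + y * l1) t with _ | m
        · simp [pvBest, hbt, hr']
        · simp [pvBest, hbt, hr', min_assoc]
      · have hZ : pvZ (c :: t) = pvZ t := by simp [pvZ, h0]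
        have hN : pvN (c :: t) = 1 + pvN t := by simp [pvN, h0]
        have hr' : r = pvR x y l0 (l1 + 1) (C + x * l0) t 0 := by
          rw [hr, pvRshift1 x y l0 l1 C c t 0 hq h0]
        have hstep : pvA3 x y (r, ans, l0, l1, pvZ (c :: t), pvN (c :: t)) c
            = (r, min ans r, l0, l1 + 1, pvZ t, pvN t) := by
          simp [pvA3, hZ, hN, hq, h0]
        rw [List.foldl_cons, hstep, ih l0 (l1 + 1) (C + x * l0) _ _ hr']
        rcases hbt : pvBest x y l0 (l1 + 1) (C + x * l0) t with _ | m
        · simp [pvBest, hbt, hr', hq, h0]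
        · simp [pvBest, hbt, hr', hq, h0, min_assoc]

lemma pvBestF (x y : Int) : ∀ (q : List Char) (l0 l1 C : Int),
    (match pvBest x y l0 l1 C q with
     | none => pvR x y l0 l1 C q 0
     | some m => min (pvR x y l0 l1 C q 0) m)
      = pvF x y l0 l1 C q := by
  intro q
  induction q with
  | nil => intro l0 l1 C; simp [pvBest, pvF, pvQ]
  | cons c t ih =>
    intro l0 l1 C
    by_cases hq : c = '?'
    · subst hq
      rw [pvF_q, ← ih (l0 + 1) l1 (C + y * l1)]
      rcases hbt : pvBest x y (l0 + 1) l1 (C + y * l1) t with _ | m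
      · simp [pvBest, hbt]
      · simp [pvBest, hbt, min_assoc]
    · rw [pvF_ne x y l0 l1 C c t hq]
      by_cases h0 : c = '0'
      · subst h0
        rw [if_pos rfl, ← ih (l0 + 1) l1 (C + y * l1)]
        rcases hbt : pvBest x y (l0 + 1) l1 (C + y * l1) t with _ | m
        · simp [pvBest, hbt, pvRshift0]
        · simp [pvBest, hbt, pvRshift0, ← min_assoc]
      · rw [if_neg h0, ← ih l0 (l1 + 1) (C + x * l0)]
        rcases hbt : pvBest x y l0 (l1 + 1) (C + x * l0) t with _ | m
        · simp [pvBest, hbt, hq, h0, pvRshift1 x y l0 l1 C c t 0 hq h0]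
        · simp [pvBest, hbt, hq, h0, pvRshift1 x y l0 l1 C c t 0 hq h0, ← min_assoc]

lemma pvAltF (s : String) (x y : Int) :
    minimize_angry_comments_alt s x y = pvF x y 0 0 0 s.toList := by
  simp only [minimize_angry_comments_alt]
  rw [pvCountQ s.toList 0]
  have htn : ((0 : Int) + (pvQ s.toList : Int) + 1 - 1).toNat = pvQ s.toList := by omega
  rw [PySem.List.pyRange_one, htn, List.foldl_map]
  unfold pvF
  congr 1
  · funext m j
    rw [pvCost_eq]
    have h1j : ((1 : Int) + j).toNat = j + 1 := by omega
    rw [h1j]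
  · rw [pvCost_eq]
    norm_num

-- ===== VERDICT (by name: the statement is the Claim_ definition above) =====
theorem minimize_angry_comments_spec : Claim_equal_minimize_angry_comments := by
  intro s x y _
  unfold Spec_minimize_angry_comments
  rw [pvAltF]
  simp only [minimize_angry_comments]
  rw [pvL1, pvL2', pvL2]
  simp only [zero_add]
  have hr0 : x * 0 * pvN s.toList + pvPX x s.toList + y * 0 * pvN s.toList + pvPY y s.toList
      = pvR x y 0 0 0 s.toList 0 := by
    rw [pvR00, pvP0]
    ring
  rw [hr0, pvL3 x y s.toList 0 0 0 (pvR x y 0 0 0 s.toList 0) (pvR x y 0 0 0 s.toList 0) rfl]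
  exact pvBestF x y s.toList 0 0 0
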